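-- pv_equiv track=rewrite | github.com/volcengine/OpenViking | openviking/storage/local_fs.py | get_ovpack_zip_path
-- ===== SOURCE A (Python) =====
-- def get_ovpack_zip_path(base_name: str, rel_path: str) -> str:
--     """Generate ZIP internal path from relative path, converting components starting with . to _._"""
--     parts = rel_path.split("/")
--     new_parts = []
--     for p in parts:
--         if p.startswith("."):
--             new_parts.append("_._" + p[1:])
--         else:
--             new_parts.append(p)
--     return f"{base_name}/{'/'.join(new_parts)}"
-- ===== SOURCE B (Python) =====
-- def get_ovpack_zip_path(base_name: str, rel_path: str) -> str:
--     """Single left-to-right character pass: a '.' at the start of the string or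
--     right after a '/' begins a component, and is rewritten to '_._'; no
--     split/rejoin is performed."""
--     out = []
--     prev = "/"
--     for c in rel_path:
--         if c == "." and prev == "/":
--             out.append("_._")
--         else:
--             out.append(c)
--         prev = c
--     return f"{base_name}/{''.join(out)}"
-- ===== Notes on version B (the rewrite author's own statement) =====
-- stated objective: alternative
-- what changed: Replaced A's split-on-'/' / per-component startswith transform / rejoin with a single left-to-right character scan that carries the previous character and rewrites a '.' found at the start or right after a '/' to '_._'.
import Mathlib
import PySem

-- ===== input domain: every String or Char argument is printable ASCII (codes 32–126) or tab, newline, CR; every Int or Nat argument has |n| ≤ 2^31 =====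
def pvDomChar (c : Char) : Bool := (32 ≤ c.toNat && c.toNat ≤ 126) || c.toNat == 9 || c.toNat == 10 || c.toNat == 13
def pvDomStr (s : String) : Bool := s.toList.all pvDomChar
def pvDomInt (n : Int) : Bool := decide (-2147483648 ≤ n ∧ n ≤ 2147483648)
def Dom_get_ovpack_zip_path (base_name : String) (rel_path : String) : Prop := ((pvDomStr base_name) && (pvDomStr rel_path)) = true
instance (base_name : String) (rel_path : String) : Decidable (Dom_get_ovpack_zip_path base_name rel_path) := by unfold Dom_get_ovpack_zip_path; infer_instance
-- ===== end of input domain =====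

-- B replaces A's split-on-'/' / transform / rejoin pass by a single character scan
-- that rewrites a '.' standing at the start or right after a '/' ("alternative", no speed claim).

-- ===== PORT A =====
-- A: parts = rel_path.split("/"); transform each part; '/'.join; prefix base_name + "/"
def get_ovpack_zip_path (base_name : String) (rel_path : String) : String :=
  let parts := PySem.Chars.splitOn rel_path.toList ['/']
  let new_parts := parts.foldl (fun acc p =>
    acc ++ [if PySem.Chars.startswith p ['.'] then
              ['_', '.', '_'] ++ PySem.List.slice p (some 1) none
            else p]) []
  String.ofList (base_name.toList ++ ['/'] ++ PySem.Chars.join ['/'] new_parts)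

-- ===== PORT B =====
-- B: one fold over the characters carrying (output so far, previous char), prev starts as '/'.
def get_ovpack_zip_path_alt (base_name : String) (rel_path : String) : String :=
  let st := rel_path.toList.foldl
    (fun (st : List Char × Char) c =>
      (st.1 ++ (if c == '.' && st.2 == '/' then ['_', '.', '_'] else [c]), c))
    ([], '/')
  String.ofList (base_name.toList ++ ['/'] ++ st.1)

-- ===== PRECONDITION & SPEC =====
def Spec_get_ovpack_zip_path (base_name : String) (rel_path : String) (out : String) : Prop := out = get_ovpack_zip_path_alt base_name rel_path
instance (base_name : String) (rel_path : String) (out : String) : Decidable (Spec_get_ovpack_zip_path base_name rel_path out) := by unfold Spec_get_ovpack_zip_path; infer_instance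

-- ===== CLAIM (what is proved, stated in full; the proofs are below) =====
def Claim_equal_get_ovpack_zip_path : Prop := ∀ (base_name : String) (rel_path : String), Dom_get_ovpack_zip_path base_name rel_path → Spec_get_ovpack_zip_path base_name rel_path (get_ovpack_zip_path base_name rel_path)

-- ===== LEMMAS AND PROOFS =====

-- prepend a list to the first component (or make it the only component)
def consHead (p : List Char) : List (List Char) → List (List Char)
  | [] => [p]
  | x :: xs => (p ++ x) :: xs

-- specification of splitting on '/'
def mySplit : List Char → List (List Char)
  | [] => [[]]
  | c :: r => if c = '/' then [] :: mySplit r else consHead [c] (mySplit r)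

-- B's scan, as a structural recursion with the previous character as state
def bRun : Char → List Char → List Char
  | _, [] => []
  | prev, c :: r => (if c == '.' && prev == '/' then ['_', '.', '_'] else [c]) ++ bRun c r

-- A's per-component transform
def fA (p : List Char) : List Char :=
  if PySem.Chars.startswith p ['.'] then ['_', '.', '_'] ++ PySem.List.slice p (some 1) none else p

lemma consHead_consHead (a b : List Char) (m : List (List Char)) :
    consHead a (consHead b m) = consHead (a ++ b) m := by
  cases m <;> simp [consHead]

lemma consHead_ne_nil (p : List Char) (m : List (List Char)) : consHead p m ≠ [] := by
  cases m <;> simp [consHead]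

lemma mySplit_ne_nil (l : List Char) : mySplit l ≠ [] := by
  cases l with
  | nil => simp [mySplit]
  | cons c r =>
    simp only [mySplit]
    split
    · simp
    · exact consHead_ne_nil _ _

lemma consHead_nil (m : List (List Char)) (h : m ≠ []) : consHead [] m = m := by
  cases m with
  | nil => exact absurd rfl h
  | cons x xs => simp [consHead]

lemma mySplit_slash (r : List Char) : mySplit ('/' :: r) = [] :: mySplit r := by
  simp [mySplit]

lemma mySplit_cons (c : Char) (r : List Char) (h : c ≠ '/') :
    mySplit (c :: r) = consHead [c] (mySplit r) := by
  simp [mySplit, h]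

lemma go_spec : ∀ (fuel : Nat) (l cur : List Char) (acc : List (List Char)),
    l.length < fuel →
    PySem.Chars.splitOn.go ['/'] fuel l cur acc =
      acc.reverse ++ consHead cur.reverse (mySplit l) := by
  intro fuel
  induction fuel with
  | zero => intro l cur acc h; omega
  | succ n ih =>
    intro l cur acc h
    cases l with
    | nil =>
      simp [PySem.Chars.splitOn.go, mySplit, consHead]
    | cons c rest =>
      rw [PySem.Chars.splitOn.go]
      by_cases hc : c = '/'
      · subst hc
        have hpre : List.isPrefixOf ['/'] ('/' :: rest) = true := by
          simp [List.isPrefixOf]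
        simp only [hpre, if_pos]
        rw [ih _ _ _ (by simpa using Nat.lt_of_succ_lt_succ h)]
        obtain ⟨m0, ms, hm⟩ : ∃ m0 ms, mySplit rest = m0 :: ms := by
          cases hms : mySplit rest with
          | nil => exact absurd hms (mySplit_ne_nil rest)
          | cons m0 ms => exact ⟨m0, ms, rfl⟩
        simp [mySplit_slash, hm, consHead]
      · have hpre : List.isPrefixOf ['/'] (c :: rest) = false := by
          simp [List.isPrefixOf]; exact fun hcc => (hc hcc.symm).elim
        simp only [hpre, Bool.false_eq_true, if_neg, not_false_iff]
        rw [ih _ _ _ (by simpa using Nat.lt_of_succ_lt_succ h)]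
        rw [mySplit_cons c rest hc, consHead_consHead]
        simp

lemma splitOn_eq_mySplit (l : List Char) :
    PySem.Chars.splitOn l ['/'] = mySplit l := by
  rw [PySem.Chars.splitOn, go_spec _ _ _ _ (Nat.lt_succ_self _)]
  simp [consHead_nil _ (mySplit_ne_nil l)]

lemma foldl_append_singleton (h : List Char → List Char) :
    ∀ (l : List (List Char)) (a : List (List Char)),
    List.foldl (fun acc p => acc ++ [h p]) a l = a ++ l.map h := by
  intro l
  induction l with
  | nil => simp
  | cons x xs ih => intro a; simp [ih]

lemma bfold_spec : ∀ (l : List Char) (out : List Char) (prev : Char),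
    (List.foldl (fun (st : List Char × Char) c =>
      (st.1 ++ (if c == '.' && st.2 == '/' then ['_', '.', '_'] else [c]), c)) (out, prev) l).1
    = out ++ bRun prev l := by
  intro l
  induction l with
  | nil => intro out prev; simp [bRun]
  | cons c r ih =>
    intro out prev
    simp only [List.foldl_cons]
    rw [ih]
    simp [bRun]

-- join of the transformed components where the FIRST component is left untouched
def joinTail : List (List Char) → List Char
  | [] => []
  | x :: xs => PySem.Chars.join ['/'] (x :: xs.map fA)

lemma join_cons_cons' (s x y : List Char) (xs : List (List Char)) :
    PySem.Chars.join s (x :: y :: xs) = x ++ s ++ PySem.Chars.join s (y :: xs) := by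
  simp [PySem.Chars.join, List.intercalate]

lemma fA_nil : fA [] = [] := by decide

lemma fA_cons (c : Char) (x : List Char) :
    fA (c :: x) = if c = '.' then ['_', '.', '_'] ++ x else c :: x := by
  unfold fA
  by_cases hc : c = '.'
  · subst hc
    simp [PySem.Chars.startswith, List.isPrefixOf, PySem.List.slice_from_one]
  · simp [PySem.Chars.startswith, List.isPrefixOf, hc, Ne.symm hc]

lemma main_spec : ∀ (l : List Char),
    (bRun '/' l = PySem.Chars.join ['/'] ((mySplit l).map fA)) ∧
    (∀ prev, prev ≠ '/' → bRun prev l = joinTail (mySplit l)) := by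
  intro l
  induction l with
  | nil =>
    constructor
    · simp [bRun, mySplit, fA_nil]
    · intro prev _; simp [bRun, mySplit, joinTail]
  | cons c r ih =>
    obtain ⟨ih1, ih2⟩ := ih
    obtain ⟨m0, ms, hm⟩ : ∃ m0 ms, mySplit r = m0 :: ms := by
      cases hms : mySplit r with
      | nil => exact absurd hms (mySplit_ne_nil r)
      | cons m0 ms => exact ⟨m0, ms, rfl⟩
    by_cases hc : c = '/'
    · subst hc
      have hres : '/' :: bRun '/' r =
          PySem.Chars.join ['/'] ((mySplit ('/' :: r)).map fA) := by
        rw [mySplit_slash, hm]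
        simp only [List.map_cons, fA_nil]
        rw [join_cons_cons']
        rw [ih1, hm]
        simp
      constructor
      · have : bRun '/' ('/' :: r) = '/' :: bRun '/' r := by simp [bRun]
        rw [this, hres]
      · intro prev _
        have : bRun prev ('/' :: r) = '/' :: bRun '/' r := by simp [bRun]
        rw [this, mySplit_slash, hm]
        simp only [joinTail, List.map_cons]
        rw [join_cons_cons']
        rw [ih1, hm]
        simp
    · have hsplit : mySplit (c :: r) = (c :: m0) :: ms := by
        rw [mySplit_cons c r hc, hm]; simp [consHead]
      have htail : bRun c r = joinTail (mySplit r) := ih2 c hc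
      have hjt : joinTail ((c :: m0) :: ms) = c :: joinTail (m0 :: ms) := by
        cases ms with
        | nil => simp [joinTail]
        | cons y ys =>
          simp only [joinTail, List.map_cons]
          rw [join_cons_cons', join_cons_cons']
          simp
      constructor
      · by_cases hdot : c = '.'
        · subst hdot
          have hstep : bRun '/' ('.' :: r) = ['_', '.', '_'] ++ bRun '.' r := by
            simp [bRun]
          rw [hstep, htail, hm, hsplit]
          simp only [List.map_cons, fA_cons]
          cases ms with
          | nil => simp [joinTail]
          | cons y ys =>
            simp only [joinTail, List.map_cons]
            rw [join_cons_cons', join_cons_cons']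
            simp
        · have hstep : bRun '/' (c :: r) = c :: bRun c r := by
            simp [bRun, hdot]
          rw [hstep, htail, hm, hsplit]
          simp only [List.map_cons, fA_cons, if_neg hdot]
          cases ms with
          | nil => simp [joinTail]
          | cons y ys =>
            simp only [joinTail, List.map_cons]
            rw [join_cons_cons', join_cons_cons']
            simp
      · intro prev hprev
        have hstep : bRun prev (c :: r) = c :: bRun c r := by
          simp [bRun, hprev]
        rw [hstep, htail, hm, hsplit, hjt]

-- ===== VERDICT (by name: the statement is the Claim_ definition above) =====
theorem get_ovpack_zip_path_spec : Claim_equal_get_ovpack_zip_path := by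
  intro base_name rel_path _
  unfold Spec_get_ovpack_zip_path get_ovpack_zip_path get_ovpack_zip_path_alt
  rw [show (fun (acc : List (List Char)) p =>
        acc ++ [if PySem.Chars.startswith p ['.'] = true then
                  ['_', '.', '_'] ++ PySem.List.slice p (some 1) none
                else p])
      = (fun (acc : List (List Char)) p => acc ++ [fA p]) from by
        funext acc p; simp [fA]]
  simp only [splitOn_eq_mySplit, foldl_append_singleton fA, bfold_spec,
    (main_spec rel_path.toList).1]
  simp
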